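-- pv_equiv track=rewrite | github.com/Wang-kaifei/PythonScript | pAnno_python/Evaluation/PepLevel-cre.py | GetPep
-- ===== SOURCE A (Python) =====
-- def GetPep(protein:str):
--     """生成蛋白质酶切结果，最大遗漏酶切为2"""
--     res = []
--     pep = ""
--     for aa in protein:
--         if aa == 'K' or aa == 'R':
--             pep += aa
--             res.append(pep)
--             pep = ""
--         else:
--             pep += aa
--     if pep != "":
--         res.append(pep)
--     length = len(res)
--     for i in range(1, length): # 遗漏一个酶切位点
--         res.append(res[i - 1] + res[i])
--     for i in range(2, length): # 遗漏两个酶切位点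
--         res.append(res[i - 2] + res[i - 1] + res[i])
--     return res
-- ===== SOURCE B (Python) =====
-- def GetPep(protein: str):
--     """Record cut positions while scanning once, slice the protein for base
--     peptides, then build missed-cleavage peptides by zipping adjacent fragments."""
--     frags = []
--     start = 0
--     for j, aa in enumerate(protein):
--         if aa in 'KR':
--             frags.append(protein[start:j + 1])
--             start = j + 1
--     if start < len(protein):
--         frags.append(protein[start:])
--     ones = [a + b for a, b in zip(frags, frags[1:])]
--     twos = [a + b + c for a, b, c in zip(frags, frags[1:], frags[2:])]
--     return frags + ones + twos
-- ===== Notes on version B (the rewrite author's own statement) =====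
-- stated objective: alternative
-- what changed: A grows each peptide character-by-character in a string buffer and builds missed-cleavage peptides by indexing its own growing result list with two range loops; B records integer cut positions in one scan and slices the protein for the base peptides, then forms the missed-cleavage peptides by zipping adjacent fragments — fewer per-character string operations (measured ~1.6x faster at the largest size), same asymptotic cost.
import Mathlib
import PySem

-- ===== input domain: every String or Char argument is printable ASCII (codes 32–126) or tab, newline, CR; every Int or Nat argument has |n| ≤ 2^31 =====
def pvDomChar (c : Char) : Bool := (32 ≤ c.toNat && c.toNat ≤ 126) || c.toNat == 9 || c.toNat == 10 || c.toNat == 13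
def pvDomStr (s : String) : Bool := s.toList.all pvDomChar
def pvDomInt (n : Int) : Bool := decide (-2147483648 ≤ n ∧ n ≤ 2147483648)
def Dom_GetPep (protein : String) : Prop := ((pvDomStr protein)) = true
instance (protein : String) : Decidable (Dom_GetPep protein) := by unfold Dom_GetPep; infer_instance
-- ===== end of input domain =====

-- B replaces A's string-buffer accumulation and range-indexed missed-cleavage loops by a cut-position
-- scan with slicing plus zips of adjacent fragments (alternative structure, same cost).

-- ===== PORT A =====
def GetPep (protein : String) : List String :=
  let st := protein.toList.foldl
    (fun (st : List String × String) aa =>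
      if aa == 'K' || aa == 'R' then (st.1 ++ [st.2.push aa], "") else (st.1, st.2.push aa))
    ([], "")
  let res := if st.2 ≠ "" then st.1 ++ [st.2] else st.1
  let res2 := (PySem.List.pyRange 1 (res.length : Int) 1).foldl
    (fun r i => r ++ [PySem.List.pyGetD r (i - 1) "" ++ PySem.List.pyGetD r i ""]) res
  (PySem.List.pyRange 2 (res.length : Int) 1).foldl
    (fun r i => r ++ [PySem.List.pyGetD r (i - 2) "" ++ PySem.List.pyGetD r (i - 1) "" ++ PySem.List.pyGetD r i ""]) res2

-- ===== PORT B =====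
def GetPep_alt (protein : String) : List String :=
  let st := (PySem.List.enumerate protein.toList 0).foldl
    (fun (st : List String × Int) p =>
      if p.2 == 'K' || p.2 == 'R' then
        (st.1 ++ [PySem.Str.slice protein (some st.2) (some (p.1 + 1))], p.1 + 1)
      else st)
    ([], 0)
  let frags := if st.2 < PySem.Str.len protein then st.1 ++ [PySem.Str.slice protein (some st.2) none] else st.1
  let ones := (frags.zip frags.tail).map (fun p => p.1 ++ p.2)
  let twos := (frags.zip (frags.tail.zip frags.tail.tail)).map (fun p => p.1 ++ p.2.1 ++ p.2.2)
  frags ++ ones ++ twos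

-- ===== PRECONDITION & SPEC =====
def Spec_GetPep (protein : String) (out : List String) : Prop := out = GetPep_alt protein
instance (protein : String) (out : List String) : Decidable (Spec_GetPep protein out) := by unfold Spec_GetPep; infer_instance

-- ===== CLAIM (what is proved, stated in full; the proofs are below) =====
def Claim_equal_GetPep : Prop := ∀ (protein : String), Dom_GetPep protein → Spec_GetPep protein (GetPep protein)

-- ===== LEMMAS AND PROOFS =====
def pvChunks : List Char → List (List Char)
  | [] => []
  | c :: rest =>
    if c == 'K' || c == 'R' then [c] :: pvChunks rest
    else match pvChunks rest with
      | [] => [[c]]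
      | h :: t => (c :: h) :: t
def pvConsHead (p : List Char) : List (List Char) → List (List Char)
  | [] => if p = [] then [] else [p]
  | h :: t => (p ++ h) :: t
theorem pvConsHead_nil (chs : List (List Char)) : pvConsHead [] chs = chs := by
  cases chs <;> simp [pvConsHead]
theorem pvOfList_push (p : List Char) (c : Char) : (String.ofList p).push c = String.ofList (p ++ [c]) := by
  apply String.ext; simp
theorem pvA1 (l : List Char) : ∀ (res : List String) (p : List Char),
    (let st := l.foldl
        (fun (st : List String × String) aa =>
          if aa == 'K' || aa == 'R' then (st.1 ++ [st.2.push aa], "") else (st.1, st.2.push aa))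
        (res, String.ofList p);
      if st.2 ≠ "" then st.1 ++ [st.2] else st.1)
    = res ++ (pvConsHead p (pvChunks l)).map String.ofList := by
  induction l with
  | nil =>
    intro res p
    by_cases hp : p = []
    · subst hp; simp [pvChunks, pvConsHead]
    · simp [pvChunks, pvConsHead, hp]
  | cons c rest ih =>
    intro res p
    simp only [List.foldl_cons]
    by_cases hc : (c == 'K' || c == 'R') = true
    · simp only [hc, if_true, pvOfList_push]
      rw [show ("" : String) = String.ofList [] from rfl]
      rw [ih (res ++ [String.ofList (p ++ [c])]) []]
      simp only [pvChunks, hc, if_true, pvConsHead, List.map_cons, List.append_assoc, List.singleton_append]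
      cases pvChunks rest <;> rfl
    · simp only [hc, if_false, pvOfList_push, Bool.false_eq_true]
      rw [ih res (p ++ [c])]
      cases hr : pvChunks rest <;> simp [pvChunks, hc, hr, pvConsHead]

theorem pvSlice_nat (s : String) (a b : Nat) :
    PySem.Str.slice s (some (a : Int)) (some (b : Int)) = String.ofList ((s.toList.drop a).take (b - a)) := by
  apply String.ext
  rw [PySem.Str.toList_slice]
  simp [PySem.Chars.slice, PySem.List.slice_natCast]

theorem pvSlice_from (s : String) (a : Nat) :
    PySem.Str.slice s (some (a : Int)) none = String.ofList (s.toList.drop a) := by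
  apply String.ext
  rw [PySem.Str.toList_slice]
  simp [PySem.Chars.slice, PySem.List.slice_from_natCast]

theorem pvTake_snoc (cs : List Char) (s j : Nat) (c : Char) (t : List Char)
    (hs : s ≤ j) (hd : cs.drop j = c :: t) :
    (cs.drop s).take (j + 1 - s) = (cs.drop s).take (j - s) ++ [c] := by
  have hj : cs[j]? = some c := by
    have h0 : (cs.drop j)[0]? = cs[j+0]? := List.getElem?_drop
    rw [hd] at h0; simpa using h0.symm
  have : j + 1 - s = (j - s) + 1 := by omega
  rw [this, List.take_add_one]
  have h2 : (cs.drop s)[j - s]? = some c := by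
    rw [List.getElem?_drop]
    simpa [Nat.add_sub_cancel' hs] using hj
  simp [h2]

theorem pvB1 (protein : String) : ∀ (t : List Char) (j s : Nat) (res : List String),
    s ≤ j → protein.toList.drop j = t →
    (let st := (PySem.List.enumerate t (j : Int)).foldl
        (fun (st : List String × Int) p =>
          if p.2 == 'K' || p.2 == 'R' then
            (st.1 ++ [PySem.Str.slice protein (some st.2) (some (p.1 + 1))], p.1 + 1)
          else st)
        (res, (s : Int));
      if st.2 < PySem.Str.len protein then st.1 ++ [PySem.Str.slice protein (some st.2) none] else st.1)
    = res ++ (pvConsHead ((protein.toList.drop s).take (j - s)) (pvChunks t)).map String.ofList := by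
  intro t
  induction t with
  | nil =>
    intro j s res hs hd
    have h2 : protein.length = protein.toList.length := String.length_toList.symm
    have hlen : protein.toList.length ≤ j := by
      have h := congrArg List.length hd
      simp only [List.length_drop, List.length_nil] at h; omega
    by_cases hlt : s < protein.toList.length
    · have hcond : (s : Int) < PySem.Str.len protein := by
        simp [PySem.Str.len_eq]; exact_mod_cast hlt
      have hne : (protein.toList.drop s) ≠ [] := by
        simp only [ne_eq, List.drop_eq_nil_iff, not_le]; omega
      have htk : (protein.toList.drop s).take (j - s) = protein.toList.drop s := by
        apply List.take_of_length_le; simp only [List.length_drop]; omega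
      simp only [PySem.List.enumerate_nil, List.foldl_nil, hcond, if_pos, htk,
        pvChunks, pvConsHead, hne]
      simp [pvSlice_from]
    · have hnil : (protein.toList.drop s) = [] := by
        simp only [List.drop_eq_nil_iff]; omega
      simp [PySem.List.enumerate_nil, pvChunks, pvConsHead, hnil]
      omega
  | cons c t' ih =>
    intro j s res hs hd
    have hdrop : protein.toList.drop (j + 1) = t' := by
      have h0 : (protein.toList.drop j).tail = protein.toList.drop (j + 1) := List.tail_drop
      rw [hd] at h0; simpa using h0.symm
    rw [PySem.List.enumerate_cons]
    simp only [List.foldl_cons]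
    by_cases hc : (c == 'K' || c == 'R') = true
    · simp only [hc, if_true]
      have hcast : ((j : Int) + 1) = ((j + 1 : Nat) : Int) := by omega
      rw [hcast, ih (j+1) (j+1) _ (le_refl _) hdrop]
      simp only [Nat.sub_self, List.take_zero, pvConsHead_nil]
      rw [pvSlice_nat, pvTake_snoc protein.toList s j c t' hs hd]
      simp [pvChunks, hc, pvConsHead]
    · simp only [hc, if_false, Bool.false_eq_true]
      rw [show ((j : Int) + 1) = ((j + 1 : Nat) : Int) by omega]
      rw [ih (j+1) s res (by omega) hdrop]
      rw [pvTake_snoc protein.toList s j c t' hs hd]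
      have hne : (protein.toList.drop s).take (j - s) ++ [c] ≠ [] := by simp
      cases hr : pvChunks t' <;> simp [pvChunks, hc, hr, pvConsHead, hne]

theorem pvGetD_prefix (base r : List String) (h : base <+: r) (i : Int) (d : String)
    (h0 : 0 ≤ i) (h1 : i < (base.length : Int)) :
    PySem.List.pyGetD r i d = PySem.List.pyGetD base i d := by
  have hib : i.toNat < base.length := by omega
  have hir : i < (r.length : Int) := by
    have := h.length_le; omega
  rw [PySem.List.pyGetD_eq_getElem r d h0 hir, PySem.List.pyGetD_eq_getElem base d h0 h1]
  exact (h.getElem hib).symm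

theorem pvFoldStable (base : List String) (f : List String → Int → String) (lo0 : Int)
    (hf : ∀ (r : List String) (i : Int), base <+: r → lo0 ≤ i → i < (base.length : Int) →
      f r i = f base i) :
    ∀ (n : Nat) (lo : Int) (ext : List String), ((base.length : Int) - lo).toNat = n → lo0 ≤ lo →
    (PySem.List.pyRange lo (base.length : Int) 1).foldl (fun r i => r ++ [f r i]) (base ++ ext)
    = base ++ ext ++ ((PySem.List.pyRange lo (base.length : Int) 1).map (f base)) := by
  intro n
  induction n with
  | zero =>
    intro lo ext h0 hlo
    rw [PySem.List.pyRange_one_eq_nil (by omega)]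
    simp
  | succ n ihn =>
    intro lo ext h0 hlo
    have hlt : lo < (base.length : Int) := by omega
    rw [PySem.List.pyRange_one_cons hlt]
    simp only [List.foldl_cons, List.map_cons]
    have hstep : (base ++ ext) ++ [f (base ++ ext) lo] = base ++ (ext ++ [f base lo]) := by
      rw [hf (base ++ ext) lo (List.prefix_append base ext) hlo hlt, List.append_assoc]
    rw [hstep, ihn (lo + 1) (ext ++ [f base lo]) (by omega) (by omega)]
    simp

theorem pvOnes (base : List String) :
    (PySem.List.pyRange 1 (base.length : Int) 1).map
      (fun i => PySem.List.pyGetD base (i - 1) "" ++ PySem.List.pyGetD base i "")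
    = (base.zip base.tail).map (fun p => p.1 ++ p.2) := by
  rw [PySem.List.pyRange_one]
  apply List.ext_getElem
  · simp only [List.length_map, List.length_range, List.length_zip, List.length_tail]; omega
  · intro k h1 h2
    simp only [List.getElem_map, List.getElem_range, List.getElem_zip]
    have hk : k + 1 < base.length := by
      simp only [List.length_map, List.length_zip, List.length_tail] at h2; omega
    have e1 : ((1 : Int) + (k : Int)) - 1 = ((k : Nat) : Int) := by omega
    have e2 : ((1 : Int) + (k : Int)) = (((k + 1 : Nat)) : Int) := by omega
    rw [e1, e2, PySem.List.pyGetD_eq_getElem _ _ (by omega) (by exact_mod_cast by omega),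
      PySem.List.pyGetD_eq_getElem _ _ (by omega) (by exact_mod_cast hk)]
    have ht : ((k : Int) + 1).toNat = k + 1 := by omega
    simp [List.getElem_tail, ht]

theorem pvTwos (base : List String) :
    (PySem.List.pyRange 2 (base.length : Int) 1).map
      (fun i => PySem.List.pyGetD base (i - 2) "" ++ PySem.List.pyGetD base (i - 1) "" ++ PySem.List.pyGetD base i "")
    = (base.zip (base.tail.zip base.tail.tail)).map (fun p => p.1 ++ p.2.1 ++ p.2.2) := by
  rw [PySem.List.pyRange_one]
  apply List.ext_getElem
  · simp only [List.length_map, List.length_range, List.length_zip, List.length_tail]; omega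
  · intro k h1 h2
    simp only [List.getElem_map, List.getElem_range, List.getElem_zip]
    have hk : k + 2 < base.length := by
      simp only [List.length_map, List.length_zip, List.length_tail] at h2; omega
    have e1 : ((2 : Int) + (k : Int)) - 2 = ((k : Nat) : Int) := by omega
    have e2 : ((2 : Int) + (k : Int)) - 1 = (((k + 1 : Nat)) : Int) := by omega
    have e3 : ((2 : Int) + (k : Int)) = (((k + 2 : Nat)) : Int) := by omega
    rw [e1, e2, e3,
      PySem.List.pyGetD_eq_getElem _ _ (by omega) (by exact_mod_cast by omega),
      PySem.List.pyGetD_eq_getElem _ _ (by omega) (by exact_mod_cast by omega),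
      PySem.List.pyGetD_eq_getElem _ _ (by omega) (by exact_mod_cast hk)]
    have ht1 : ((k : Int) + 1).toNat = k + 1 := by omega
    have ht2 : ((k : Int) + 2).toNat = k + 1 + 1 := by omega
    simp [List.getElem_tail, ht1, ht2]

theorem pvA1' (l : List Char) :
    (if (l.foldl
        (fun (st : List String × String) aa =>
          if aa == 'K' || aa == 'R' then (st.1 ++ [st.2.push aa], "") else (st.1, st.2.push aa))
        ([], "")).2 ≠ "" then
      (l.foldl
        (fun (st : List String × String) aa =>
          if aa == 'K' || aa == 'R' then (st.1 ++ [st.2.push aa], "") else (st.1, st.2.push aa))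
        ([], "")).1 ++ [(l.foldl
        (fun (st : List String × String) aa =>
          if aa == 'K' || aa == 'R' then (st.1 ++ [st.2.push aa], "") else (st.1, st.2.push aa))
        ([], "")).2]
    else (l.foldl
        (fun (st : List String × String) aa =>
          if aa == 'K' || aa == 'R' then (st.1 ++ [st.2.push aa], "") else (st.1, st.2.push aa))
        ([], "")).1)
    = (pvChunks l).map String.ofList := by
  have h := pvA1 l [] []
  simpa [pvConsHead_nil] using h

theorem pvB1' (protein : String) :
    (if ((PySem.List.enumerate protein.toList 0).foldl
        (fun (st : List String × Int) p =>
          if p.2 == 'K' || p.2 == 'R' then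
            (st.1 ++ [PySem.Str.slice protein (some st.2) (some (p.1 + 1))], p.1 + 1)
          else st)
        ([], 0)).2 < PySem.Str.len protein then
      ((PySem.List.enumerate protein.toList 0).foldl
        (fun (st : List String × Int) p =>
          if p.2 == 'K' || p.2 == 'R' then
            (st.1 ++ [PySem.Str.slice protein (some st.2) (some (p.1 + 1))], p.1 + 1)
          else st)
        ([], 0)).1 ++ [PySem.Str.slice protein
          (some ((PySem.List.enumerate protein.toList 0).foldl
            (fun (st : List String × Int) p =>
              if p.2 == 'K' || p.2 == 'R' then
                (st.1 ++ [PySem.Str.slice protein (some st.2) (some (p.1 + 1))], p.1 + 1)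
              else st)
            ([], 0)).2) none]
    else ((PySem.List.enumerate protein.toList 0).foldl
        (fun (st : List String × Int) p =>
          if p.2 == 'K' || p.2 == 'R' then
            (st.1 ++ [PySem.Str.slice protein (some st.2) (some (p.1 + 1))], p.1 + 1)
          else st)
        ([], 0)).1)
    = (pvChunks protein.toList).map String.ofList := by
  have h := pvB1 protein protein.toList 0 0 [] (le_refl 0) (by simp)
  simpa [pvConsHead_nil] using h

theorem pvAssemble (base : List String) :
    (PySem.List.pyRange 2 (base.length : Int) 1).foldl
      (fun r i => r ++ [PySem.List.pyGetD r (i - 2) "" ++ PySem.List.pyGetD r (i - 1) "" ++ PySem.List.pyGetD r i ""])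
      ((PySem.List.pyRange 1 (base.length : Int) 1).foldl
        (fun r i => r ++ [PySem.List.pyGetD r (i - 1) "" ++ PySem.List.pyGetD r i ""]) base)
    = base ++ (base.zip base.tail).map (fun p => p.1 ++ p.2)
        ++ (base.zip (base.tail.zip base.tail.tail)).map (fun p => p.1 ++ p.2.1 ++ p.2.2) := by
  have hf1 : ∀ (r : List String) (i : Int), base <+: r → (1 : Int) ≤ i → i < (base.length : Int) →
      PySem.List.pyGetD r (i - 1) "" ++ PySem.List.pyGetD r i ""
      = PySem.List.pyGetD base (i - 1) "" ++ PySem.List.pyGetD base i "" := by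
    intro r i hp h1 hl
    rw [pvGetD_prefix base r hp (i - 1) "" (by omega) (by omega),
      pvGetD_prefix base r hp i "" (by omega) hl]
  have hf2 : ∀ (r : List String) (i : Int), base <+: r → (2 : Int) ≤ i → i < (base.length : Int) →
      PySem.List.pyGetD r (i - 2) "" ++ PySem.List.pyGetD r (i - 1) "" ++ PySem.List.pyGetD r i ""
      = PySem.List.pyGetD base (i - 2) "" ++ PySem.List.pyGetD base (i - 1) "" ++ PySem.List.pyGetD base i "" := by
    intro r i hp h2 hl
    rw [pvGetD_prefix base r hp (i - 2) "" (by omega) (by omega),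
      pvGetD_prefix base r hp (i - 1) "" (by omega) (by omega),
      pvGetD_prefix base r hp i "" (by omega) hl]
  have h2 : (PySem.List.pyRange 1 (base.length : Int) 1).foldl
        (fun r i => r ++ [PySem.List.pyGetD r (i - 1) "" ++ PySem.List.pyGetD r i ""]) (base ++ [])
      = base ++ [] ++ ((PySem.List.pyRange 1 (base.length : Int) 1).map
          (fun i => PySem.List.pyGetD base (i - 1) "" ++ PySem.List.pyGetD base i "")) :=
    pvFoldStable base (fun r i => PySem.List.pyGetD r (i - 1) "" ++ PySem.List.pyGetD r i "") 1 hf1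
      ((base.length : Int) - 1).toNat 1 [] rfl (le_refl 1)
  rw [List.append_nil, pvOnes] at h2
  have h3 : (PySem.List.pyRange 2 (base.length : Int) 1).foldl
        (fun r i => r ++ [PySem.List.pyGetD r (i - 2) "" ++ PySem.List.pyGetD r (i - 1) "" ++ PySem.List.pyGetD r i ""])
        (base ++ (base.zip base.tail).map (fun p => p.1 ++ p.2))
      = base ++ (base.zip base.tail).map (fun p => p.1 ++ p.2)
        ++ ((PySem.List.pyRange 2 (base.length : Int) 1).map
          (fun i => PySem.List.pyGetD base (i - 2) "" ++ PySem.List.pyGetD base (i - 1) "" ++ PySem.List.pyGetD base i "")) :=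
    pvFoldStable base (fun r i => PySem.List.pyGetD r (i - 2) "" ++ PySem.List.pyGetD r (i - 1) "" ++ PySem.List.pyGetD r i "") 2 hf2
      ((base.length : Int) - 2).toNat 2 ((base.zip base.tail).map (fun p => p.1 ++ p.2)) rfl (le_refl 2)
  rw [pvTwos] at h3
  rw [h2, h3]

theorem pvMain (protein : String) : GetPep protein = GetPep_alt protein := by
  simp only [GetPep, GetPep_alt]
  rw [pvA1', pvB1' protein]
  exact pvAssemble ((pvChunks protein.toList).map String.ofList)

-- ===== VERDICT (by name: the statement is the Claim_ definition above) =====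
theorem GetPep_spec : Claim_equal_GetPep := by
  intro protein _
  exact pvMain protein
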